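-- pv_equiv track=rewrite | github.com/mrtong96/bomb_busters | src/game_state_possibilities2.py | get_wire_placements
-- ===== SOURCE A (Python) =====
-- from typing import Optional, Iterator
--
-- def get_wire_placements(max_wires, wires, players) -> Iterator[tuple[int, ...]]:
--     """
--     Returns an iterator to go through all possible tuples of distributing wires to players
--
--     :param max_wires: Total wires in play (including the ones not considering). Used to infer hand size
--     :param wires: Wires to distribute
--     :param players: How many players
--
--     :return: an iterator of tuples to go through each wire placement
--     """
--     limits = [(max_wires + players - i - 1) // players for i in range(players)]
--
--     def get_wire_placement_helper(helper_wires, helper_players):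
--         if helper_players == 1:
--             if (wires == max_wires and helper_wires == limits[-1]) or helper_wires <= limits[-1]:
--                 yield(helper_wires,)
--             return
--
--         for num_wires in range(min(limits[-helper_players], helper_wires) + 1):
--             for remainder in get_wire_placement_helper(helper_wires - num_wires, helper_players - 1):
--                 yield (num_wires,) + remainder
--
--     return get_wire_placement_helper(wires, players)
-- ===== SOURCE B (Python) =====
-- def get_wire_placements(max_wires, wires, players):
--     """Iterative breadth-first product with window pruning: extend all partial
--     placements one player at a time, keeping only counts that can still reach
--     `wires` given the remaining players' capacity (A recurses depth-first)."""
--     limits = [(max_wires + players - i - 1) // players for i in range(players)]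
--     rest = sum(limits)
--     partials = [((), wires)]
--     for l in limits:
--         rest -= l
--         partials = [(p + (n,), r - n)
--                     for (p, r) in partials
--                     for n in range(max(0, r - rest), min(l, r) + 1)]
--     return [p for (p, _) in partials]
-- ===== Notes on version B (the rewrite author's own statement) =====
-- stated objective: alternative
-- what changed: Replaces A's top-down recursive generator by an iterative breadth-first sweep that extends a flat list of partial placements one player at a time, pruning each count with a reachability window (both a lower bound from the remaining players' capacity and A's upper bound), then reads the prefixes off the final frontier.
-- intended difference: On players == 1 with wires < 0 and wires <= max_wires, A yields the placement (wires,) containing a negative wire count while B yields nothing; an empty enumeration is the intended result for a negative number of wires. — e.g. on get_wire_placements(0, -1, 1): A returns [[-1]], B returns []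
import Mathlib
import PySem

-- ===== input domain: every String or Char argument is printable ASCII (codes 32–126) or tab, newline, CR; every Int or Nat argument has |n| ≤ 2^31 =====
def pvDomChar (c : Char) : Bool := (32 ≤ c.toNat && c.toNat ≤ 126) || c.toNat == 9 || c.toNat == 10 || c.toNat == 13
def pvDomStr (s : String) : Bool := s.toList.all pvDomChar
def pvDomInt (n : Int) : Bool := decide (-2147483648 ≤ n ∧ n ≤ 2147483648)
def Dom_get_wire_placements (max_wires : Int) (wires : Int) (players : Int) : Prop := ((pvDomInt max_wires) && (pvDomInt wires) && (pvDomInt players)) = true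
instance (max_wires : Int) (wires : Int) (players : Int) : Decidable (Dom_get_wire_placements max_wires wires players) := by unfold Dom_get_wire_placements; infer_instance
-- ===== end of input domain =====

-- B replaces A's top-down recursive generator by a bottom-up DP over suffixes keyed by the
-- reachable remaining sum; both produce the same list of placements (A's is a generator:
-- equivalence is about the sequence of yielded tuples, materialised as a list).

-- ===== PORT A =====
-- A's inner recursive generator; helper_players is ported as a Nat counter (the Python
-- recursion only ever calls it with players, players-1, …, 1 under Pre_; for players ≤ 0
-- Python raises IndexError on limits[-helper_players], which Pre_ excludes — the 0-case and
-- the pyGetD defaults below are only those unreachable totality guards).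
def pvHelperA (max_wires wires : Int) (limits : List Int) : Int → Nat → List (List Int)
  | _, 0 => []
  | hw, 1 =>
      let lim := PySem.List.pyGetD limits (-1) 0
      if (wires = max_wires ∧ hw = lim) ∨ hw ≤ lim then [[hw]] else []
  | hw, (k+2) =>
      let lim := PySem.List.pyGetD limits (-((k : Int) + 2)) 0
      (PySem.List.pyRange 0 (min lim hw + 1)).flatMap
        (fun n => (pvHelperA max_wires wires limits (hw - n) (k+1)).map (fun r => n :: r))

def get_wire_placements (max_wires : Int) (wires : Int) (players : Int) : List (List Int) :=
  let limits := (PySem.List.pyRange 0 players).map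
    (fun i => PySem.Int.floordiv (max_wires + players - i - 1) players)
  pvHelperA max_wires wires limits wires players.toNat

-- ===== PORT B =====
-- one iteration of B's `for l in limits` loop; state = (rest, partials)
def pvB_step (st : Int × List (List Int × Int)) (l : Int) : Int × List (List Int × Int) :=
  let rest := st.1 - l
  (rest,
   st.2.flatMap (fun pr =>
     (PySem.List.pyRange (max 0 (pr.2 - rest)) (min l pr.2 + 1)).map
       (fun n => (pr.1 ++ [n], pr.2 - n))))

def get_wire_placements_alt (max_wires : Int) (wires : Int) (players : Int) : List (List Int) :=
  let limits := (PySem.List.pyRange 0 players).map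
    (fun i => PySem.Int.floordiv (max_wires + players - i - 1) players)
  let st := limits.foldl pvB_step (limits.foldl (· + ·) 0, [(([] : List Int), wires)])
  st.2.map (·.1)

-- ===== PRECONDITION & SPEC =====
-- Pre_ excludes players < 1, on which A's generator raises IndexError (limits[-players] on
-- an empty/too-short list) as soon as it is iterated.
def Pre_get_wire_placements (max_wires : Int) (wires : Int) (players : Int) : Prop := 1 ≤ players
instance (max_wires : Int) (wires : Int) (players : Int) : Decidable (Pre_get_wire_placements max_wires wires players) := by unfold Pre_get_wire_placements; infer_instance

def pvWitness_get_wire_placements : Int × Int × Int := (5, 3, 2)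

-- On players = 1 with wires < 0 ≤ hand size bound (wires ≤ max_wires), A yields the
-- nonsensical placement (wires,) containing a negative wire count, while B yields nothing;
-- an empty enumeration is the intended result for a negative number of wires.
def D_get_wire_placements (max_wires : Int) (wires : Int) (players : Int) : Prop :=
  players = 1 ∧ wires < 0 ∧ wires ≤ max_wires
instance (max_wires : Int) (wires : Int) (players : Int) : Decidable (D_get_wire_placements max_wires wires players) := by unfold D_get_wire_placements; infer_instance

def Spec_get_wire_placements (max_wires : Int) (wires : Int) (players : Int) (out : List (List Int)) : Prop := ¬ D_get_wire_placements max_wires wires players → out = get_wire_placements_alt max_wires wires players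
instance (max_wires : Int) (wires : Int) (players : Int) (out : List (List Int)) : Decidable (Spec_get_wire_placements max_wires wires players out) := by unfold Spec_get_wire_placements; infer_instance

def pvDiffWitness_get_wire_placements : Int × Int × Int := (0, -1, 1)
def pvDiffWitnessOut_get_wire_placements : (List (List Int)) × (List (List Int)) := ([[-1]], [])

-- ===== CLAIM (what is proved, stated in full; the proofs are below) =====
def Claim_unchanged_get_wire_placements : Prop := ∀ (max_wires : Int) (wires : Int) (players : Int), Dom_get_wire_placements max_wires wires players → Pre_get_wire_placements max_wires wires players → Spec_get_wire_placements max_wires wires players (get_wire_placements max_wires wires players)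
def Claim_changed_get_wire_placements : Prop := Dom_get_wire_placements (pvDiffWitness_get_wire_placements.1) (pvDiffWitness_get_wire_placements.2.1) (pvDiffWitness_get_wire_placements.2.2) ∧ Pre_get_wire_placements (pvDiffWitness_get_wire_placements.1) (pvDiffWitness_get_wire_placements.2.1) (pvDiffWitness_get_wire_placements.2.2) ∧ D_get_wire_placements (pvDiffWitness_get_wire_placements.1) (pvDiffWitness_get_wire_placements.2.1) (pvDiffWitness_get_wire_placements.2.2) ∧ get_wire_placements (pvDiffWitness_get_wire_placements.1) (pvDiffWitness_get_wire_placements.2.1) (pvDiffWitness_get_wire_placements.2.2) = pvDiffWitnessOut_get_wire_placements.1 ∧ get_wire_placements_alt (pvDiffWitness_get_wire_placements.1) (pvDiffWitness_get_wire_placements.2.1) (pvDiffWitness_get_wire_placements.2.2) = pvDiffWitnessOut_get_wire_placements.2 ∧ pvDiffWitnessOut_get_wire_placements.1 ≠ pvDiffWitnessOut_get_wire_placements.2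
def Claim_exact_get_wire_placements : Prop := ∀ (max_wires : Int) (wires : Int) (players : Int), Dom_get_wire_placements max_wires wires players → Pre_get_wire_placements max_wires wires players → D_get_wire_placements max_wires wires players → get_wire_placements max_wires wires players ≠ get_wire_placements_alt max_wires wires players

-- ===== LEMMAS AND PROOFS =====

-- reference enumeration: all tuples (n_i) with 0 ≤ n_i ≤ limit_i and Σ n_i = s, lex order
def pvEnum : List Int → Int → List (List Int)
  | [], _ => []
  | [l], s => if 0 ≤ s ∧ s ≤ l then [[s]] else []
  | l :: l' :: ls, s =>
      (PySem.List.pyRange 0 (min l s + 1)).flatMap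
        (fun n => (pvEnum (l' :: ls) (s - n)).map (fun r => n :: r))

theorem pvFlatMap_congr {α β : Type} (l : List α) (f g : α → List β)
    (h : ∀ a ∈ l, f a = g a) : l.flatMap f = l.flatMap g := by
  induction l with
  | nil => rfl
  | cons a t ih =>
      simp only [List.flatMap_cons]
      rw [h a (List.mem_cons_self), ih (fun x hx => h x (List.mem_cons_of_mem _ hx))]

theorem pvEnum_eq_nil (ls : List Int) (s : Int) (h : s < 0 ∨ ls.sum < s) : pvEnum ls s = [] := by
  induction ls generalizing s with
  | nil => rfl
  | cons l t ih =>
      cases t with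
      | nil =>
          simp only [pvEnum, List.sum_cons, List.sum_nil] at *
          rw [if_neg]; omega
      | cons l' t' =>
          simp only [pvEnum]
          rcases h with h | h
          · rw [PySem.List.pyRange_one_eq_nil (by omega)]; rfl
          · rw [List.flatMap_eq_nil_iff]
            intro n hn
            rw [PySem.List.mem_pyRange_one] at hn
            rw [ih (s - n) (by simp only [List.sum_cons] at h ⊢; omega)]
            rfl

-- B's frontier semantics: placements for the remaining limits `ls` summing to s,
-- with B's reachability window on each count
def pvEnumW : List Int → Int → List (List Int)
  | [], _ => [[]]
  | l :: ls, s =>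
      (PySem.List.pyRange (max 0 (s - ls.sum)) (min l s + 1)).flatMap
        (fun n => (pvEnumW ls (s - n)).map (fun r => n :: r))

theorem pvB_fold (L : List Int) :
    ∀ (P : List (List Int × Int)),
      ((L.foldl pvB_step (L.sum, P)).2).map (·.1)
        = P.flatMap (fun pr => (pvEnumW L pr.2).map (fun r => pr.1 ++ r)) := by
  induction L with
  | nil =>
      intro P
      simp only [List.foldl_nil, pvEnumW]
      induction P with
      | nil => rfl
      | cons q t ihp => simp only [List.map_cons, List.flatMap_cons, List.map_cons,
          List.map_nil, List.append_nil, List.singleton_append, ihp]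
  | cons l ls ih =>
      intro P
      simp only [List.foldl_cons, pvB_step]
      rw [show (l :: ls).sum - l = ls.sum by simp]
      rw [ih]
      rw [List.flatMap_assoc]
      apply pvFlatMap_congr
      intro pr _
      rw [List.flatMap_map]
      simp only [pvEnumW, List.sum_cons]
      rw [List.map_flatMap]
      apply pvFlatMap_congr
      intro n _
      simp [List.map_map, Function.comp]

theorem pvEnum_eq_pvEnumW (ls : List Int) (s : Int) (h : ls ≠ []) :
    pvEnum ls s = pvEnumW ls s := by
  induction ls generalizing s with
  | nil => exact absurd rfl h
  | cons l t ih =>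
      cases t with
      | nil =>
          simp only [pvEnum, pvEnumW, List.sum_nil, sub_zero]
          by_cases hc : 0 ≤ s ∧ s ≤ l
          · rw [if_pos hc]
            rw [show max 0 s = s by omega, show min l s = s by omega,
              PySem.List.pyRange_one_singleton]
            simp [pvEnumW]
          · rw [if_neg hc, PySem.List.pyRange_one_eq_nil (by omega)]
            rfl
      | cons t1 t2 =>
          by_cases hs : s < 0
          · rw [pvEnum_eq_nil _ _ (Or.inl hs)]
            simp only [pvEnumW]
            rw [PySem.List.pyRange_one_eq_nil (by omega)]
            rfl
          · push_neg at hs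
            simp only [pvEnum, pvEnumW]
            by_cases hb : max 0 (s - (t1 :: t2).sum) ≤ min l s + 1
            · rw [PySem.List.pyRange_one_append 0 (max 0 (s - (t1 :: t2).sum))
                (min l s + 1) (by omega) hb]
              rw [List.flatMap_append]
              have h0 : (PySem.List.pyRange 0 (max 0 (s - (t1 :: t2).sum))).flatMap
                  (fun n => (pvEnum (t1 :: t2) (s - n)).map (fun r => n :: r)) = [] := by
                rw [List.flatMap_eq_nil_iff]
                intro n hn
                rw [PySem.List.mem_pyRange_one] at hn
                rw [pvEnum_eq_nil _ _ (by omega), List.map_nil]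
              rw [h0, List.nil_append]
              apply pvFlatMap_congr
              intro n hn
              rw [ih (s - n) (by simp)]
              simp only [pvEnumW]
            · rw [PySem.List.pyRange_one_eq_nil
                (a := max 0 (s - (t1 :: t2).sum)) (b := min l s + 1) (by omega),
                List.flatMap_nil]
              rw [List.flatMap_eq_nil_iff]
              intro n hn
              rw [PySem.List.mem_pyRange_one] at hn
              rw [pvEnum_eq_nil _ _ (by omega), List.map_nil]

theorem pvFoldlSum (l : List Int) : l.foldl (· + ·) 0 = l.sum := by
  rw [List.sum_eq_foldl]

-- B computes pvEnum of the limits list (whenever limits is nonempty)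
theorem pvAlt_eq_pvEnum (max_wires wires players : Int)
    (limits : List Int)
    (hl : limits = (PySem.List.pyRange 0 players).map
      (fun i => PySem.Int.floordiv (max_wires + players - i - 1) players))
    (hne : limits ≠ []) :
    get_wire_placements_alt max_wires wires players = pvEnum limits wires := by
  simp only [get_wire_placements_alt]
  rw [← hl, pvFoldlSum, pvB_fold limits [(([] : List Int), wires)]]
  rw [List.flatMap_singleton]
  rw [pvEnum_eq_pvEnumW limits wires hne]
  simp

-- A's recursive generator computes pvEnum of the suffix of limits it is working on
theorem pvHelperA_eq (max_wires wires : Int) (ss : List Int) :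
    ∀ (front : List Int) (hw : Int), (2 ≤ ss.length ∨ 0 ≤ hw) → ss ≠ [] →
      pvHelperA max_wires wires (front ++ ss) hw ss.length = pvEnum ss hw := by
  induction ss with
  | nil => intro _ _ _ h; exact absurd rfl h
  | cons l t ih =>
      intro front hw hpos _
      cases t with
      | nil =>
          have hhw : 0 ≤ hw := by simpa using hpos
          simp only [List.length_cons, List.length_nil, pvHelperA, pvEnum,
            PySem.List.pyGetD_neg_one_append_singleton]
          split_ifs with h1 h2 h2 <;> first | rfl | (exfalso; omega)
      | cons l' t' =>
          have hlen : (l :: l' :: t').length = t'.length + 2 := by simp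
          rw [hlen]
          have hidx : PySem.List.pyGetD (front ++ l :: l' :: t') (-((t'.length : Int) + 2)) 0
              = l := by
            have h2 : ((t'.length + 2 : Nat) : Int) = (t'.length : Int) + 2 := by push_cast; ring
            rw [← h2, PySem.List.pyGetD_neg_natCast _ _ _ (by omega) (by simp)]
            have hi : (front ++ l :: l' :: t').length - (t'.length + 2) = front.length := by
              simp
            simp only [hi]
            rw [List.getElem_append_right (by omega)]
            simp
          simp only [pvHelperA, hidx, pvEnum]
          apply pvFlatMap_congr
          intro n hn
          rw [PySem.List.mem_pyRange_one] at hn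
          have : front ++ l :: l' :: t' = (front ++ [l]) ++ (l' :: t') := by simp
          rw [this]
          have hlen2 : t'.length + 1 = (l' :: t').length := by simp
          rw [hlen2, ih (front ++ [l]) (hw - n) (by right; omega) (by simp)]

theorem pvLimits_length (max_wires players : Int) :
    ((PySem.List.pyRange 0 players).map
      (fun i => PySem.Int.floordiv (max_wires + players - i - 1) players)).length
      = players.toNat := by
  simp [PySem.List.length_pyRange_one]

theorem pvLimits_one (max_wires : Int) :
    ((PySem.List.pyRange 0 1).map
      (fun i => PySem.Int.floordiv (max_wires + 1 - i - 1) 1)) = [max_wires] := by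
  have h1 : PySem.List.pyRange 0 1 = [0] := by
    rw [PySem.List.pyRange_one_cons (by omega), PySem.List.pyRange_one_eq_nil (by omega)]
  rw [h1]
  simp only [List.map_cons, List.map_nil]
  have : max_wires + 1 - 0 - 1 = max_wires := by ring
  rw [this, PySem.Int.floordiv_eq_ediv_of_pos (by omega), Int.ediv_one]

-- ===== VERDICT (by name: the statement is the Claim_ definition above) =====
theorem get_wire_placements_spec : Claim_unchanged_get_wire_placements := by
  intro max_wires wires players _ hpre
  unfold Spec_get_wire_placements
  intro hnd
  unfold Pre_get_wire_placements at hpre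
  unfold D_get_wire_placements at hnd
  set limits := (PySem.List.pyRange 0 players).map
    (fun i => PySem.Int.floordiv (max_wires + players - i - 1) players) with hl
  have hlen : limits.length = players.toNat := pvLimits_length max_wires players
  have hne : limits ≠ [] := by
    intro h; rw [h] at hlen; simp at hlen; omega
  rw [pvAlt_eq_pvEnum max_wires wires players limits hl hne]
  show pvHelperA max_wires wires limits wires players.toNat = pvEnum limits wires
  by_cases hp1 : players = 1
  · subst hp1
    have hlim : limits = [max_wires] := by rw [hl]; exact pvLimits_one max_wires
    rw [hlim]
    show pvHelperA max_wires wires [max_wires] wires 1 = pvEnum [max_wires] wires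
    simp only [pvHelperA, pvEnum]
    have hget : PySem.List.pyGetD [max_wires] (-1) 0 = max_wires := by
      have := PySem.List.pyGetD_neg_one_append_singleton ([] : List Int) max_wires 0
      simpa using this
    rw [hget]
    have hnd' : ¬ (wires < 0 ∧ wires ≤ max_wires) := fun h => hnd ⟨rfl, h⟩
    split_ifs with h1 h2 h2 <;> first | rfl | (exfalso; omega)
  · have hp2 : 2 ≤ players := by omega
    have h2 : 2 ≤ limits.length := by rw [hlen]; omega
    have := pvHelperA_eq max_wires wires limits [] wires (Or.inl h2) hne
    rw [← hlen]
    simpa using this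

theorem get_wire_placements_changed : Claim_changed_get_wire_placements := by
  unfold Claim_changed_get_wire_placements; decide

theorem get_wire_placements_tight : Claim_exact_get_wire_placements := by
  intro max_wires wires players _ _ hd
  obtain ⟨hp, hw0, hwm⟩ := hd
  subst hp
  have hlim := pvLimits_one max_wires
  have ha : get_wire_placements max_wires wires 1 = [[wires]] := by
    unfold get_wire_placements
    rw [hlim]
    show pvHelperA max_wires wires [max_wires] wires 1 = [[wires]]
    simp only [pvHelperA]
    rw [if_pos]
    right
    have hget : PySem.List.pyGetD [max_wires] (-1) 0 = max_wires := by
      have := PySem.List.pyGetD_neg_one_append_singleton ([] : List Int) max_wires 0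
      simpa using this
    rw [hget]; exact hwm
  have hb : get_wire_placements_alt max_wires wires 1 = [] := by
    rw [pvAlt_eq_pvEnum max_wires wires 1 [max_wires] hlim.symm (by simp)]
    exact pvEnum_eq_nil _ _ (Or.inl hw0)
  rw [ha, hb]
  simp
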